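-- pv_equiv track=rewrite | github.com/queelius/computational-explorations | src/schur_groups.py | _can_k_color_sum_free
-- ===== SOURCE A (Python) =====
-- from itertools import product, combinations
-- from typing import Set, List, Tuple, Dict, FrozenSet, Optional
--
-- def group_add(a: Tuple[int, ...], b: Tuple[int, ...],
--               orders: Tuple[int, ...]) -> Tuple[int, ...]:
--     """Componentwise addition mod orders."""
--     return tuple((ai + bi) % ni for ai, bi, ni in zip(a, b, orders))
--
-- def is_sum_free(S: FrozenSet[Tuple[int, ...]], orders: Tuple[int, ...]) -> bool:
--     """Check if S is sum-free: no a,b,c ∈ S with a+b=c."""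
--     S_set = set(S)
--     for a in S:
--         for b in S:
--             c = group_add(a, b, orders)
--             if c in S_set:
--                 return False
--     return True
--
-- def _can_k_color_sum_free(subset: list, orders: Tuple[int, ...], k: int) -> bool:
--     """Check if subset can be k-colored with each color sum-free."""
--     n = len(subset)
--     # Try all k-colorings (k^n possibilities)
--     for coloring in product(range(k), repeat=n):
--         # Check each color class
--         all_ok = True
--         for c in range(k):
--             color_class = frozenset(subset[i] for i in range(n) if coloring[i] == c)
--             if not is_sum_free(color_class, orders):
--                 all_ok = False
--                 break
--         if all_ok:
--             return True
--     return False
-- ===== SOURCE B (Python) =====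
-- def group_add(a, b, orders):
--     return tuple((ai + bi) % ni for ai, bi, ni in zip(a, b, orders))
--
-- def _can_k_color_sum_free(subset: list, orders, k: int) -> bool:
--     """Check if subset can be k-colored with each color sum-free.
--
--     DFS backtracking: assign elements one by one, keeping every color class
--     sum-free via an incremental check (each class carries the set of its
--     pairwise sums), pruning a branch as soon as a class would stop being
--     sum-free; class state is mutated in place and undone on backtrack."""
--     n = len(subset)
--     classes = {}  # color -> set of elements
--     sums = {}     # color -> set of pairwise sums of that class
--
--     def dfs(i):
--         if i == n:
--             return True
--         x = subset[i]
--         xo = xx = None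
--         for c in range(k):
--             cls = classes.setdefault(c, set())
--             if x in cls:
--                 if dfs(i + 1):
--                     return True
--                 continue
--             sm = sums.setdefault(c, set())
--             if xo is None:
--                 xo = tuple(zip(x, orders))  # pre-zipped (x_j, orders_j) pairs
--                 xx = tuple((xj + xj) % nj for xj, nj in xo)
--             if xx == x or xx in cls or x in sm:
--                 continue
--             # optimistically add the new pairwise sums; undo on failure/backtrack
--             added = []
--             if xx not in sm:
--                 sm.add(xx)
--                 added.append(xx)
--             ok = True
--             for a in cls:
--                 # s = group_add(a, x, orders) == group_add(x, a, orders)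
--                 s = tuple((aj + xj) % nj for aj, (xj, nj) in zip(a, xo))
--                 if s == x or s in cls:
--                     ok = False
--                     break
--                 if s not in sm:
--                     sm.add(s)
--                     added.append(s)
--             if ok:
--                 cls.add(x)
--                 if dfs(i + 1):
--                     return True
--                 cls.discard(x)
--             sm.difference_update(added)
--         return False
--
--     return dfs(0)
-- ===== Notes on version B (the rewrite author's own statement) =====
-- stated objective: alternative
-- what changed: Replaced the exhaustive enumeration of all k^n colorings (each checked from scratch with a quadratic sum-free test per color class) by DFS backtracking that colors elements one at a time, keeping every class sum-free via an incremental constraint check against the class's maintained pairwise-sum set and pruning a branch as soon as a class would stop being sum-free.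
-- outside the precondition, e.g. on _can_k_color_sum_free([(0,), (1, 1)], (2, 0), 1): A returns False, B returns False; on _can_k_color_sum_free([(-2, -4, 5), (), (), (-5,), (2, 4, 5)], (2, 0), 1): A returns False, B raises ZeroDivisionError
import Mathlib
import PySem

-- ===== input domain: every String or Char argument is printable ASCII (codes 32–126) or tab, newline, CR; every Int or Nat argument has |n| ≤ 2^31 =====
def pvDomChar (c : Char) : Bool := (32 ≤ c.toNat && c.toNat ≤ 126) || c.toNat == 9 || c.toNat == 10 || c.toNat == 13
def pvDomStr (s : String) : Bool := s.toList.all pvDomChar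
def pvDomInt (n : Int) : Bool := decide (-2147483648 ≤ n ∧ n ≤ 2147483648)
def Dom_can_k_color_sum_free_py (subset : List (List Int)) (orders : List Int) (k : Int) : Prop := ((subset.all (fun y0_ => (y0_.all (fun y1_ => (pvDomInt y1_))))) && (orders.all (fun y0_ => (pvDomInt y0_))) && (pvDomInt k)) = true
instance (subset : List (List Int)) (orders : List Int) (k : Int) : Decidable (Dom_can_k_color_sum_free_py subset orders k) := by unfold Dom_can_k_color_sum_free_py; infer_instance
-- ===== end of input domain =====

-- B replaces A's exhaustive scan of all k^n colorings by DFS backtracking with an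
-- incremental sum-free check (each color class carries its set of pairwise sums).

-- ===== PORT A =====
-- helper group_add: componentwise (a+b) % orders (3-way zip truncates like Python's zip)
def groupAdd (a b ord : List Int) : List Int :=
  (a.zip (b.zip ord)).map (fun p => PySem.Int.mod (p.1 + p.2.1) p.2.2)

-- helper is_sum_free: nested loops with early return False = all/all/not-contains
def isSumFree (S : List (List Int)) (ord : List Int) : Bool :=
  S.all (fun a => S.all (fun b => !(S.contains (groupAdd a b ord))))

-- the loop 'for coloring in product(range(k), repeat=n): if pred(coloring): return True'
-- (itertools.product is a lazy iterator: colorings are produced in lexicographic order,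
-- first coordinate slowest, and the loop exits at the first success)
def pyProductAny (k : Int) (pred : List Int → Bool) : Nat → List Int → Bool
  | 0, acc => pred acc
  | m+1, acc => (PySem.List.pyRange 0 k 1).any (fun c => pyProductAny k pred m (acc ++ [c]))

def can_k_color_sum_free_py (subset : List (List Int)) (orders : List Int) (k : Int) : Bool :=
  let n := subset.length
  pyProductAny k (fun coloring =>
    (PySem.List.pyRange 0 k 1).all (fun c =>
      isSumFree (PySem.Set.ofList
        (((List.range n).filter (fun i => coloring.getD i 0 == c)).map (fun i => subset.getD i [])))
        orders)) n []

-- ===== PORT B =====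
-- incremental check: cls is sum-free with pairwise-sum set sm, x not in cls;
-- does cls | {x} stay sum-free?  (mirrors the two 'continue' tests in Source B's loop)
def canExtend (cls sm : List (List Int)) (x ord : List Int) : Bool :=
  if groupAdd x x ord == x || cls.contains (groupAdd x x ord) || sm.contains x then false
  else if cls.any (fun a => groupAdd a x ord == x || cls.contains (groupAdd a x ord)) then false
  else true

-- DFS over the elements; classes : color ↦ class, sums : color ↦ pairwise sums of the class
-- (Source B mutates the two dicts in place and undoes on backtrack; here the updated
-- dicts are passed to the recursive call, which is the same state evolution)
def dfsColor (orders : List Int) (k : Int) :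
    List (List Int) → PySem.Dict Int (List (List Int)) → PySem.Dict Int (List (List Int)) → Bool
  | [], _, _ => true
  | x :: rest, classes, sums =>
    (PySem.List.pyRange 0 k 1).any (fun c =>
      let cls := classes.getD c []
      if cls.contains x then dfsColor orders k rest classes sums
      else
        let sm := sums.getD c []
        canExtend cls sm x orders &&
          dfsColor orders k rest (classes.insert c (PySem.Set.add cls x))
            (sums.insert c
              (cls.foldl (fun s a => PySem.Set.add s (groupAdd a x orders))
                (PySem.Set.add sm (groupAdd x x orders)))))

def can_k_color_sum_free_py_alt (subset : List (List Int)) (orders : List Int) (k : Int) : Bool :=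
  dfsColor orders k subset PySem.Dict.empty PySem.Dict.empty

-- ===== PRECONDITION & SPEC =====
-- Pre_ excludes inputs where a zero entry of orders is reachable by some pair of subset
-- elements (k ≥ 1, subset nonempty): there Python's '%' may raise ZeroDivisionError
-- (on a few such inputs A still returns False before reaching the zero divisor; B may raise there).
def Pre_can_k_color_sum_free_py (subset : List (List Int)) (orders : List Int) (k : Int) : Prop :=
  subset = [] ∨ k < 1 ∨
    ∀ x ∈ subset, ∀ y ∈ subset, ∀ j : Nat,
      j < x.length → j < y.length → j < orders.length → orders.getD j 0 ≠ 0
instance (subset : List (List Int)) (orders : List Int) (k : Int) : Decidable (Pre_can_k_color_sum_free_py subset orders k) := by unfold Pre_can_k_color_sum_free_py; infer_instance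

def pvWitness_can_k_color_sum_free_py : List (List Int) × List Int × Int := ([[0], [1]], [5], 2)

def Spec_can_k_color_sum_free_py (subset : List (List Int)) (orders : List Int) (k : Int) (out : Bool) : Prop := out = can_k_color_sum_free_py_alt subset orders k
instance (subset : List (List Int)) (orders : List Int) (k : Int) (out : Bool) : Decidable (Spec_can_k_color_sum_free_py subset orders k out) := by unfold Spec_can_k_color_sum_free_py; infer_instance

-- ===== CLAIM (what is proved, stated in full; the proofs are below) =====
def Claim_equal_can_k_color_sum_free_py : Prop := ∀ (subset : List (List Int)) (orders : List Int) (k : Int), Dom_can_k_color_sum_free_py subset orders k → Pre_can_k_color_sum_free_py subset orders k → Spec_can_k_color_sum_free_py subset orders k (can_k_color_sum_free_py subset orders k)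

-- ===== LEMMAS AND PROOFS =====

-- sum-freeness of a membership predicate
def SFP (P : List Int → Prop) (ord : List Int) : Prop :=
  ∀ a b, P a → P b → ¬ P (groupAdd a b ord)

theorem groupAdd_comm (a b ord : List Int) : groupAdd a b ord = groupAdd b a ord := by
  induction a generalizing b ord with
  | nil => cases b <;> cases ord <;> simp [groupAdd]
  | cons ah at' ih =>
    cases b with
    | nil => cases ord <;> simp [groupAdd]
    | cons bh bt =>
      cases ord with
      | nil => simp [groupAdd]
      | cons oh ot =>
        have h := ih bt ot
        simp [groupAdd] at h ⊢
        exact ⟨by rw [Int.add_comm], h⟩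

theorem isSumFree_iff (S : List (List Int)) (ord : List Int) :
    isSumFree S ord = true ↔ SFP (· ∈ S) ord := by
  simp [isSumFree, SFP, List.all_eq_true]
  exact ⟨fun h a b ha hb => h a ha b hb, fun h a ha b hb => h a b ha hb⟩

theorem SFP_mono {P Q : List Int → Prop} {ord : List Int}
    (h : ∀ y, P y → Q y) (hQ : SFP Q ord) : SFP P ord :=
  fun a b ha hb hc => hQ a b (h a ha) (h b hb) (h _ hc)

theorem SFP_congr {P Q : List Int → Prop} {ord : List Int}
    (h : ∀ y, P y ↔ Q y) : SFP P ord ↔ SFP Q ord :=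
  ⟨SFP_mono (fun y hy => (h y).2 hy), SFP_mono (fun y hy => (h y).1 hy)⟩

theorem canExtend_iff (cls sm : List (List Int)) (x ord : List Int)
    (h : SFP (· ∈ cls) ord)
    (hsm : ∀ y, y ∈ sm ↔ ∃ a ∈ cls, ∃ b ∈ cls, groupAdd a b ord = y)
    (hx : x ∉ cls) :
    canExtend cls sm x ord = true ↔ SFP (fun y => y ∈ cls ∨ y = x) ord := by
  simp only [canExtend, Bool.or_eq_true, beq_iff_eq, List.contains_eq_mem, decide_eq_true_eq,
    List.any_eq_true]
  constructor
  · intro hc a b ha hb hval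
    have h1 : ¬((groupAdd x x ord = x ∨ groupAdd x x ord ∈ cls) ∨ x ∈ sm) := by
      intro hbad
      rw [if_pos hbad] at hc
      exact Bool.false_ne_true hc
    rw [if_neg h1] at hc
    have h2 : ¬∃ a ∈ cls, groupAdd a x ord = x ∨ groupAdd a x ord ∈ cls := by
      intro hbad
      rw [if_pos hbad] at hc
      exact Bool.false_ne_true hc
    rcases ha with ha | rfl <;> rcases hb with hb | rfl
    · rcases hval with hv | hv
      · exact h a b ha hb hv
      · exact h1 (Or.inr ((hsm x).mpr ⟨a, ha, b, hb, hv⟩))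
    · rcases hval with hv | hv
      · exact h2 ⟨a, ha, Or.inr hv⟩
      · exact h2 ⟨a, ha, Or.inl hv⟩
    · rw [groupAdd_comm] at hval
      rcases hval with hv | hv
      · exact h2 ⟨b, hb, Or.inr hv⟩
      · exact h2 ⟨b, hb, Or.inl hv⟩
    · rcases hval with hv | hv
      · exact h1 (Or.inl (Or.inr hv))
      · exact h1 (Or.inl (Or.inl hv))
  · intro hs
    have h1 : ¬((groupAdd x x ord = x ∨ groupAdd x x ord ∈ cls) ∨ x ∈ sm) := by
      rintro ((hv | hv) | hv)
      · exact hs x x (Or.inr rfl) (Or.inr rfl) (Or.inr hv)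
      · exact hs x x (Or.inr rfl) (Or.inr rfl) (Or.inl hv)
      · obtain ⟨a, ha, b, hb, hab⟩ := (hsm x).mp hv
        exact hs a b (Or.inl ha) (Or.inl hb) (Or.inr hab)
    have h2 : ¬∃ a ∈ cls, groupAdd a x ord = x ∨ groupAdd a x ord ∈ cls := by
      rintro ⟨a, ha, hv | hv⟩
      · exact hs a x (Or.inl ha) (Or.inr rfl) (Or.inr hv)
      · exact hs a x (Or.inl ha) (Or.inr rfl) (Or.inl hv)
    rw [if_neg h1, if_neg h2]

theorem mem_newSums (cls sm : List (List Int)) (x ord y : List Int) :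
    y ∈ cls.foldl (fun s a => PySem.Set.add s (groupAdd a x ord))
          (PySem.Set.add sm (groupAdd x x ord)) ↔
      y ∈ sm ∨ y = groupAdd x x ord ∨ ∃ a ∈ cls, y = groupAdd a x ord := by
  rw [PySem.Set.mem_foldl_add, PySem.Set.mem_add]
  tauto

theorem dfs_iff (orders : List Int) (k : Int) :
    ∀ (xs : List (List Int)) (classes sums : PySem.Dict Int (List (List Int))),
    (∀ c : Int, SFP (· ∈ classes.getD c []) orders) →
    (∀ (c : Int) (y : List Int), y ∈ sums.getD c [] ↔
        ∃ a ∈ classes.getD c [], ∃ b ∈ classes.getD c [], groupAdd a b orders = y) →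
    (dfsColor orders k xs classes sums = true ↔
      ∃ col : List Int, col.length = xs.length ∧ (∀ v ∈ col, 0 ≤ v ∧ v < k) ∧
        ∀ c : Int, 0 ≤ c → c < k →
          SFP (fun y => y ∈ classes.getD c [] ∨ ∃ p ∈ xs.zip col, p.1 = y ∧ p.2 = c) orders) := by
  intro xs
  induction xs with
  | nil =>
    intro classes sums hinv _
    simp only [dfsColor, true_iff]
    refine ⟨[], rfl, by simp, ?_⟩
    intro c _ _
    exact SFP_mono (fun y hy => by simpa using hy) (hinv c)
  | cons x rest ih =>
    intro classes sums hinv hsm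
    simp only [dfsColor, List.any_eq_true, PySem.List.mem_pyRange_one]
    constructor
    · rintro ⟨c, ⟨hc0, hck⟩, hbr⟩
      by_cases hmem : x ∈ classes.getD c []
      · -- duplicate: state unchanged
        rw [if_pos (by simpa using hmem)] at hbr
        obtain ⟨col', hlen, hbnd, hsf⟩ := (ih _ _ hinv hsm).mp hbr
        refine ⟨c :: col', by simp [hlen], ?_, ?_⟩
        · intro v hv
          rcases List.mem_cons.mp hv with rfl | hv'
          · exact ⟨hc0, hck⟩
          · exact hbnd v hv'
        · intro c' h0 hk
          refine SFP_mono (fun z hz => ?_) (hsf c' h0 hk)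
          rcases hz with hz | ⟨p, hp, hp1, hp2⟩
          · exact Or.inl hz
          · rcases List.mem_cons.mp (by simpa using hp) with rfl | hp'
            · exact Or.inl (hp2 ▸ hp1 ▸ hmem)
            · exact Or.inr ⟨p, hp', hp1, hp2⟩
      · rw [if_neg (by simpa using hmem), Bool.and_eq_true] at hbr
        obtain ⟨hce, hdfs⟩ := hbr
        have hsfc : SFP (fun y => y ∈ classes.getD c [] ∨ y = x) orders :=
          (canExtend_iff _ _ _ _ (hinv c) (hsm c) hmem).mp hce
        have hinv' : ∀ c' : Int,
            SFP (· ∈ (classes.insert c (PySem.Set.add (classes.getD c []) x)).getD c' []) orders := by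
          intro c'
          rw [PySem.Dict.getD_insert]
          by_cases hcc : c' = c
          · simp only [hcc, if_true]
            exact SFP_mono (fun y hy => by simpa [PySem.Set.mem_add] using hy) hsfc
          · simp only [hcc, if_false]
            exact hinv c'
        have hsm' : ∀ (c' : Int) (y : List Int),
            y ∈ (sums.insert c
              ((classes.getD c []).foldl (fun s a => PySem.Set.add s (groupAdd a x orders))
                (PySem.Set.add (sums.getD c []) (groupAdd x x orders)))).getD c' [] ↔
              ∃ a ∈ (classes.insert c (PySem.Set.add (classes.getD c []) x)).getD c' [],
                ∃ b ∈ (classes.insert c (PySem.Set.add (classes.getD c []) x)).getD c' [],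
                  groupAdd a b orders = y := by
          intro c' y
          rw [PySem.Dict.getD_insert, PySem.Dict.getD_insert]
          by_cases hcc : c' = c
          · simp only [hcc, if_true]
            rw [mem_newSums]
            constructor
            · rintro (hy | rfl | ⟨a, ha, rfl⟩)
              · obtain ⟨a, ha, b, hb, hab⟩ := (hsm c y).mp hy
                exact ⟨a, (PySem.Set.mem_add _ _ _).mpr (Or.inl ha),
                       b, (PySem.Set.mem_add _ _ _).mpr (Or.inl hb), hab⟩
              · exact ⟨x, (PySem.Set.mem_add _ _ _).mpr (Or.inr rfl),
                       x, (PySem.Set.mem_add _ _ _).mpr (Or.inr rfl), rfl⟩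
              · exact ⟨a, (PySem.Set.mem_add _ _ _).mpr (Or.inl ha),
                       x, (PySem.Set.mem_add _ _ _).mpr (Or.inr rfl), rfl⟩
            · rintro ⟨a, ha, b, hb, rfl⟩
              rcases (PySem.Set.mem_add _ _ _).mp ha with ha' | hax <;>
                rcases (PySem.Set.mem_add _ _ _).mp hb with hb' | hbx
              · exact Or.inl ((hsm c _).mpr ⟨a, ha', b, hb', rfl⟩)
              · exact Or.inr (Or.inr ⟨a, ha', by rw [hbx]⟩)
              · exact Or.inr (Or.inr ⟨b, hb', by rw [hax, groupAdd_comm]⟩)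
              · exact Or.inr (Or.inl (by rw [hax, hbx]))
          · simp only [hcc, if_false]
            exact hsm c' y
        obtain ⟨col', hlen, hbnd, hsf⟩ := (ih _ _ hinv' hsm').mp hdfs
        refine ⟨c :: col', by simp [hlen], ?_, ?_⟩
        · intro v hv
          rcases List.mem_cons.mp hv with rfl | hv'
          · exact ⟨hc0, hck⟩
          · exact hbnd v hv'
        · intro c' h0 hk
          refine SFP_mono (fun y hy => ?_) (hsf c' h0 hk)
          rw [PySem.Dict.getD_insert]
          by_cases hcc : c' = c
          · subst hcc
            simp only [if_true, PySem.Set.mem_add]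
            rcases hy with hy | ⟨p, hp, hp1, hp2⟩
            · exact Or.inl (Or.inl hy)
            · rcases List.mem_cons.mp (by simpa using hp) with rfl | hp'
              · exact Or.inl (Or.inr hp1.symm)
              · exact Or.inr ⟨p, hp', hp1, hp2⟩
          · simp only [hcc, if_false]
            rcases hy with hy | ⟨p, hp, hp1, hp2⟩
            · exact Or.inl hy
            · rcases List.mem_cons.mp (by simpa using hp) with rfl | hp'
              · exact absurd hp2.symm hcc
              · exact Or.inr ⟨p, hp', hp1, hp2⟩
    · rintro ⟨col, hlen, hbnd, hsf⟩
      cases col with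
      | nil => simp at hlen
      | cons c0 col0 =>
        have hc : 0 ≤ c0 ∧ c0 < k := hbnd c0 (List.mem_cons_self ..)
        refine ⟨c0, hc, ?_⟩
        by_cases hmem : x ∈ classes.getD c0 []
        · rw [if_pos (by simpa using hmem)]
          refine (ih _ _ hinv hsm).mpr ⟨col0, by simpa using hlen,
            fun v hv => hbnd v (List.mem_cons_of_mem _ hv), ?_⟩
          intro c' h0 hk
          refine SFP_mono (fun z hz => ?_) (hsf c' h0 hk)
          rcases hz with hz | ⟨p, hp, hp1, hp2⟩
          · exact Or.inl hz
          · exact Or.inr ⟨p, by simp [hp], hp1, hp2⟩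
        · rw [if_neg (by simpa using hmem), Bool.and_eq_true]
          have hce : canExtend (classes.getD c0 []) (sums.getD c0 []) x orders = true := by
            refine (canExtend_iff _ _ _ _ (hinv c0) (hsm c0) hmem).mpr ?_
            refine SFP_mono (fun z hz => ?_) (hsf c0 hc.1 hc.2)
            rcases hz with hz | hz
            · exact Or.inl hz
            · exact Or.inr ⟨(x, c0), by simp, hz.symm, rfl⟩
          refine ⟨hce, ?_⟩
          have hsfc : SFP (fun y => y ∈ classes.getD c0 [] ∨ y = x) orders :=
            (canExtend_iff _ _ _ _ (hinv c0) (hsm c0) hmem).mp hce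
          have hinv' : ∀ c' : Int,
              SFP (· ∈ (classes.insert c0 (PySem.Set.add (classes.getD c0 []) x)).getD c' []) orders := by
            intro c'
            rw [PySem.Dict.getD_insert]
            by_cases hcc : c' = c0
            · simp only [hcc, if_true]
              exact SFP_mono (fun y hy => by simpa [PySem.Set.mem_add] using hy) hsfc
            · simp only [hcc, if_false]
              exact hinv c'
          have hsm' : ∀ (c' : Int) (y : List Int),
              y ∈ (sums.insert c0
                ((classes.getD c0 []).foldl (fun s a => PySem.Set.add s (groupAdd a x orders))
                  (PySem.Set.add (sums.getD c0 []) (groupAdd x x orders)))).getD c' [] ↔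
                ∃ a ∈ (classes.insert c0 (PySem.Set.add (classes.getD c0 []) x)).getD c' [],
                  ∃ b ∈ (classes.insert c0 (PySem.Set.add (classes.getD c0 []) x)).getD c' [],
                    groupAdd a b orders = y := by
            intro c' y
            rw [PySem.Dict.getD_insert, PySem.Dict.getD_insert]
            by_cases hcc : c' = c0
            · simp only [hcc, if_true]
              rw [mem_newSums]
              constructor
              · rintro (hy | rfl | ⟨a, ha, rfl⟩)
                · obtain ⟨a, ha, b, hb, hab⟩ := (hsm c0 y).mp hy
                  exact ⟨a, (PySem.Set.mem_add _ _ _).mpr (Or.inl ha),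
                         b, (PySem.Set.mem_add _ _ _).mpr (Or.inl hb), hab⟩
                · exact ⟨x, (PySem.Set.mem_add _ _ _).mpr (Or.inr rfl),
                         x, (PySem.Set.mem_add _ _ _).mpr (Or.inr rfl), rfl⟩
                · exact ⟨a, (PySem.Set.mem_add _ _ _).mpr (Or.inl ha),
                         x, (PySem.Set.mem_add _ _ _).mpr (Or.inr rfl), rfl⟩
              · rintro ⟨a, ha, b, hb, rfl⟩
                rcases (PySem.Set.mem_add _ _ _).mp ha with ha' | hax <;>
                  rcases (PySem.Set.mem_add _ _ _).mp hb with hb' | hbx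
                · exact Or.inl ((hsm c0 _).mpr ⟨a, ha', b, hb', rfl⟩)
                · exact Or.inr (Or.inr ⟨a, ha', by rw [hbx]⟩)
                · exact Or.inr (Or.inr ⟨b, hb', by rw [hax, groupAdd_comm]⟩)
                · exact Or.inr (Or.inl (by rw [hax, hbx]))
            · simp only [hcc, if_false]
              exact hsm c' y
          refine (ih _ _ hinv' hsm').mpr ⟨col0, by simpa using hlen,
            fun v hv => hbnd v (List.mem_cons_of_mem _ hv), ?_⟩
          intro c' h0 hk
          refine SFP_mono (fun z hz => ?_) (hsf c' h0 hk)
          rw [PySem.Dict.getD_insert] at hz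
          by_cases hcc : c' = c0
          · rw [hcc]
            rw [hcc, if_pos rfl] at hz
            rcases hz with hz | ⟨p, hp, hp1, hp2⟩
            · rcases (PySem.Set.mem_add _ _ _).mp hz with hz | hz
              · exact Or.inl hz
              · exact Or.inr ⟨(x, c0), by simp, hz.symm, rfl⟩
            · exact Or.inr ⟨p, by simp [hp], hp1, hp2⟩
          · rw [if_neg hcc] at hz
            rcases hz with hz | ⟨p, hp, hp1, hp2⟩
            · exact Or.inl hz
            · exact Or.inr ⟨p, by simp [hp], hp1, hp2⟩

theorem pyProductAny_iff (k : Int) (pred : List Int → Bool) :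
    ∀ (m : Nat) (acc : List Int),
    pyProductAny k pred m acc = true ↔
      ∃ ext : List Int, ext.length = m ∧ (∀ v ∈ ext, 0 ≤ v ∧ v < k) ∧ pred (acc ++ ext) = true := by
  intro m
  induction m with
  | zero =>
    intro acc
    simp only [pyProductAny]
    constructor
    · intro h; exact ⟨[], rfl, by simp, by simpa using h⟩
    · rintro ⟨ext, hlen, _, hp⟩
      rw [List.length_eq_zero_iff] at hlen
      subst hlen
      simpa using hp
  | succ m ih =>
    intro acc
    simp only [pyProductAny, List.any_eq_true, PySem.List.mem_pyRange_one]
    constructor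
    · rintro ⟨c, hc, h⟩
      obtain ⟨ext', hlen, hbnd, hp⟩ := (ih _).mp h
      refine ⟨c :: ext', by simp [hlen], ?_, by simpa using hp⟩
      intro v hv
      rcases List.mem_cons.mp hv with rfl | hv'
      · exact hc
      · exact hbnd v hv'
    · rintro ⟨ext, hlen, hbnd, hp⟩
      cases ext with
      | nil => simp at hlen
      | cons c ext' =>
        refine ⟨c, hbnd c (List.mem_cons_self ..), (ih _).mpr ⟨ext', by simpa using hlen, ?_, by simpa using hp⟩⟩
        exact fun v hv => hbnd v (List.mem_cons_of_mem _ hv)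

theorem zip_mem_char (subset : List (List Int)) (col : List Int)
    (hlen : col.length = subset.length) (y : List Int) (c : Int) :
    (∃ p ∈ subset.zip col, p.1 = y ∧ p.2 = c) ↔
      ∃ i, ∃ _ : i < subset.length, subset.getD i [] = y ∧ col.getD i 0 = c := by
  constructor
  · rintro ⟨p, hp, h1, h2⟩
    obtain ⟨i, hi, he⟩ := List.mem_iff_getElem.mp hp
    rw [List.length_zip, hlen, Nat.min_self] at hi
    refine ⟨i, hi, ?_, ?_⟩
    · rw [List.getD_eq_getElem _ _ hi]
      have := List.getElem_zip (l := subset) (l' := col) (i := i)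
        (h := by rw [List.length_zip, hlen, Nat.min_self]; exact hi)
      rw [he] at this
      rw [← h1, this]
    · rw [List.getD_eq_getElem _ _ (by omega : i < col.length)]
      have := List.getElem_zip (l := subset) (l' := col) (i := i)
        (h := by rw [List.length_zip, hlen, Nat.min_self]; exact hi)
      rw [he] at this
      rw [← h2, this]
  · rintro ⟨i, hi, h1, h2⟩
    have hiz : i < (subset.zip col).length := by rw [List.length_zip, hlen, Nat.min_self]; exact hi
    refine ⟨(subset.zip col)[i], List.getElem_mem hiz, ?_⟩
    rw [List.getElem_zip]
    constructor
    · rw [← h1, List.getD_eq_getElem _ _ hi]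
    · rw [← h2, List.getD_eq_getElem _ _ (by omega : i < col.length)]

theorem classList_mem (subset : List (List Int)) (col : List Int)
    (hlen : col.length = subset.length) (c : Int) (y : List Int) :
    (y ∈ PySem.Set.ofList (((List.range subset.length).filter
        (fun i => col.getD i 0 == c)).map (fun i => subset.getD i []))) ↔
      ∃ p ∈ subset.zip col, p.1 = y ∧ p.2 = c := by
  rw [zip_mem_char subset col hlen y c]
  simp only [PySem.Set.mem_ofList, List.mem_map, List.mem_filter, List.mem_range, beq_iff_eq]
  constructor
  · rintro ⟨i, ⟨hi, hc⟩, he⟩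
    exact ⟨i, hi, he, hc⟩
  · rintro ⟨i, hi, he, hc⟩
    exact ⟨i, ⟨hi, hc⟩, he⟩

theorem A_iff (subset : List (List Int)) (orders : List Int) (k : Int) :
    can_k_color_sum_free_py subset orders k = true ↔
      ∃ col : List Int, col.length = subset.length ∧ (∀ v ∈ col, 0 ≤ v ∧ v < k) ∧
        ∀ c : Int, 0 ≤ c → c < k →
          SFP (fun y => ∃ p ∈ subset.zip col, p.1 = y ∧ p.2 = c) orders := by
  unfold can_k_color_sum_free_py
  rw [pyProductAny_iff]
  constructor
  · rintro ⟨col, hlen, hbnd, hall⟩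
    rw [List.nil_append] at hall
    refine ⟨col, hlen, hbnd, ?_⟩
    intro c h0 hk
    have hone := (List.all_eq_true.mp hall) c (PySem.List.mem_pyRange_one.mpr ⟨h0, hk⟩)
    have hsf := (isSumFree_iff _ _).mp hone
    exact (SFP_congr (fun y => (classList_mem subset col hlen c y).symm)).mpr hsf
  · rintro ⟨col, hlen, hbnd, hsf⟩
    refine ⟨col, hlen, hbnd, ?_⟩
    rw [List.nil_append, List.all_eq_true]
    intro c hc
    obtain ⟨h0, hk⟩ := PySem.List.mem_pyRange_one.mp hc
    rw [isSumFree_iff]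
    exact (SFP_congr (fun y => classList_mem subset col hlen c y)).mpr (hsf c h0 hk)

-- ===== VERDICT (by name: the statement is the Claim_ definition above) =====
theorem can_k_color_sum_free_py_spec : Claim_equal_can_k_color_sum_free_py := by
  intro subset orders k _ _
  unfold Spec_can_k_color_sum_free_py
  have hB := dfs_iff orders k subset PySem.Dict.empty PySem.Dict.empty
    (by intro c; simp [SFP, PySem.Dict.getD_empty])
    (by intro c y; simp [PySem.Dict.getD_empty])
  have hA := A_iff subset orders k
  have : can_k_color_sum_free_py subset orders k = true ↔
      can_k_color_sum_free_py_alt subset orders k = true := by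
    rw [hA]
    unfold can_k_color_sum_free_py_alt
    rw [hB]
    simp [PySem.Dict.getD_empty]
  exact Bool.coe_iff_coe.mp this
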